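-- pv_equiv track=rewrite | github.com/mikejmorgan-ai/casecraft | analyze_claims.py | scan_pass
-- ===== SOURCE A (Python) =====
-- def scan_pass(paragraphs, keywords, shuffle_order=False):
--     """Run a scan pass. The second pass reverses keyword check order to simulate
--     an independent agent that might short-circuit differently on edge cases."""
--     matched = set()
--     kws = list(reversed(keywords)) if shuffle_order else keywords
--     for num, text in paragraphs.items():
--         text_lower = text.lower()
--         for kw in kws:
--             if kw.lower() in text_lower:
--                 matched.add(num)
--                 break
--     return matched
-- ===== SOURCE B (Python) =====
-- def scan_pass(paragraphs, keywords, shuffle_order=False):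
--     """Position-driven multi-pattern scan: lowercase keywords once, bucket them
--     by first character, then walk each lowered text position by position and
--     only test the keywords whose first character matches that position.
--     Keyword order cannot change the matched set, so shuffle_order is moot."""
--     lows = [kw.lower() for kw in keywords]
--     if "" in lows:
--         # the empty keyword is a substring of every text
--         return set(paragraphs.keys())
--     buckets = {}
--     for kw in lows:
--         buckets.setdefault(kw[0], []).append(kw)
--     return {num for num, text in paragraphs.items()
--             if _hit(text.lower(), buckets)}
--
--
-- def _hit(tl, buckets):
--     for i, c in enumerate(tl):
--         for kw in buckets.get(c, ()):
--             if tl.startswith(kw, i):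
--                 return True
--     return False
-- ===== Notes on version B (the rewrite author's own statement) =====
-- stated objective: alternative
-- what changed: B replaces A's per-paragraph loop over all keywords (which re-lowercases every keyword for every paragraph) by a position-driven multi-pattern scan: keywords are lowercased once and bucketed by first character into a dict, then each lowered text is walked position by position testing only the keywords whose first character matches (empty keyword handled as match-everything); keyword order cannot change the matched set, so shuffle_order's reversal disappears.
import Mathlib
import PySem

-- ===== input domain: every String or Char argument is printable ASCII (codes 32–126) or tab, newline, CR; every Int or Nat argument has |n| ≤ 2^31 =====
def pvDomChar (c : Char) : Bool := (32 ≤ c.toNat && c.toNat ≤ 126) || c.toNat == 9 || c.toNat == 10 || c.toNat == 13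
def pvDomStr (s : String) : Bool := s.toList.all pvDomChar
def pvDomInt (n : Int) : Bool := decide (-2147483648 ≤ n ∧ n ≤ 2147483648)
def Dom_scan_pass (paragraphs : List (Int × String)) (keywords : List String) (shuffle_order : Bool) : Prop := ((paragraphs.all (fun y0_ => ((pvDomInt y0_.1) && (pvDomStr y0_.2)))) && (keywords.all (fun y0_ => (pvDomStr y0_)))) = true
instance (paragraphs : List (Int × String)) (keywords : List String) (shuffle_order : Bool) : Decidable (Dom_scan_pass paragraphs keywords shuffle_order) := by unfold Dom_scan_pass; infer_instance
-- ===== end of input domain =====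

-- B replaces A's per-paragraph keyword loop by a position-driven scan over
-- each text using keywords lowercased and bucketed by first character once; objective: alternative.

-- ===== PORT A =====
-- inner 'for kw in kws: if kw.lower() in text_lower: matched.add(num); break'
def scanInnerA (kws : List String) (text_lower : String) (num : Int)
    (matched : PySem.Set Int) : PySem.Set Int :=
  match kws with
  | [] => matched
  | kw :: rest =>
      if PySem.Str.isIn (PySem.Str.lower kw) text_lower then
        PySem.Set.add matched num
      else
        scanInnerA rest text_lower num matched

def scan_pass (paragraphs : List (Int × String)) (keywords : List String) (shuffle_order : Bool) : List Int :=
  let kws := if shuffle_order then keywords.reverse else keywords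
  paragraphs.foldl
    (fun matched p => scanInnerA kws (PySem.Str.lower p.2) p.1 matched)
    PySem.Set.empty

-- ===== PORT B =====
-- 'buckets.setdefault(kw[0], []).append(kw)' over lows (all nonempty; the []
-- match arm is only a totality guard the Python never reaches)
def buildBuckets (lows : List (List Char)) : PySem.Dict Char (List (List Char)) :=
  lows.foldl
    (fun d kw =>
      match kw with
      | [] => d
      | c :: _ => PySem.Dict.modify d c [] (· ++ [kw]))
    PySem.Dict.empty

-- '_hit': walk tl position by position; 'tl.startswith(kw, i)' on the suffix
def bwalk (buckets : PySem.Dict Char (List (List Char))) : List Char → Bool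
  | [] => false
  | c :: rest =>
      if (PySem.Dict.getD buckets c []).any (fun kw => kw.isPrefixOf (c :: rest)) then
        true
      else
        bwalk buckets rest

def scan_pass_alt (paragraphs : List (Int × String)) (keywords : List String) (shuffle_order : Bool) : List Int :=
  let lows := keywords.map (fun kw => (PySem.Str.lower kw).toList)
  if lows.contains [] then
    paragraphs.foldl (fun s p => PySem.Set.add s p.1) PySem.Set.empty
  else
    let buckets := buildBuckets lows
    paragraphs.foldl
      (fun s p =>
        if bwalk buckets (PySem.Str.lower p.2).toList then PySem.Set.add s p.1 else s)
      PySem.Set.empty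

-- ===== PRECONDITION & SPEC =====
def Spec_scan_pass (paragraphs : List (Int × String)) (keywords : List String) (shuffle_order : Bool) (out : List Int) : Prop := out = scan_pass_alt paragraphs keywords shuffle_order
instance (paragraphs : List (Int × String)) (keywords : List String) (shuffle_order : Bool) (out : List Int) : Decidable (Spec_scan_pass paragraphs keywords shuffle_order out) := by unfold Spec_scan_pass; infer_instance

-- ===== CLAIM =====
def Claim_equal_scan_pass : Prop := ∀ (paragraphs : List (Int × String)) (keywords : List String) (shuffle_order : Bool), Dom_scan_pass paragraphs keywords shuffle_order → Spec_scan_pass paragraphs keywords shuffle_order (scan_pass paragraphs keywords shuffle_order)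

-- ===== LEMMAS AND PROOFS =====

theorem if_if_or {α : Type} (c d : Bool) (X m : α) :
    (if c = true then X else if d = true then X else m)
      = if (c || d) = true then X else m := by
  cases c <;> cases d <;> simp

-- A's break loop equals an 'any' test over the keyword list.
theorem scanInnerA_eq_any (kws : List String) (tl : String) (num : Int)
    (m : PySem.Set Int) :
    scanInnerA kws tl num m =
      if kws.any (fun kw => PySem.Str.isIn (PySem.Str.lower kw) tl) then
        PySem.Set.add m num
      else m := by
  induction kws with
  | nil => simp [scanInnerA]
  | cons kw rest ih =>
      simp only [scanInnerA, List.any_cons, ih]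
      rw [if_if_or]; rfl

theorem getD_buildBuckets_aux (lows : List (List Char))
    (d : PySem.Dict Char (List (List Char))) (c : Char) :
    PySem.Dict.getD
        (lows.foldl
          (fun d kw => match kw with
            | [] => d
            | c' :: _ => PySem.Dict.modify d c' [] (· ++ [kw])) d) c []
      = PySem.Dict.getD d c [] ++ lows.filter (fun kw => kw.head? == some c) := by
  induction lows generalizing d with
  | nil => simp
  | cons kw rest ih =>
      cases kw with
      | nil => simpa using ih d
      | cons c' t =>
          simp only [List.foldl_cons, ih, List.filter_cons]
          rw [PySem.Dict.getD_modify]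
          by_cases hc : c = c'
          · simp [hc, List.append_assoc]
          · simp [hc]
            exact fun he => hc he.symm

theorem getD_buildBuckets (lows : List (List Char)) (c : Char) :
    PySem.Dict.getD (buildBuckets lows) c []
      = lows.filter (fun kw => kw.head? == some c) := by
  simpa [buildBuckets] using getD_buildBuckets_aux lows PySem.Dict.empty c

theorem bwalk_iff (lows : List (List Char)) (h : [] ∉ lows) (tl : List Char) :
    bwalk (buildBuckets lows) tl = true ↔
      ∃ kw ∈ lows, ∃ j, kw <+: tl.drop j := by
  induction tl with
  | nil =>
      simp only [bwalk]
      constructor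
      · intro hw; exact absurd hw (by simp)
      · rintro ⟨kw, hkw, j, hpre⟩
        simp only [List.drop_nil, List.prefix_nil] at hpre
        exact absurd (hpre ▸ hkw) h
  | cons c rest ih =>
      simp only [bwalk, getD_buildBuckets]
      constructor
      · intro hw
        split at hw
        · rename_i hany
          obtain ⟨kw, hkwmem, hpre⟩ := List.any_eq_true.mp hany
          have hmem := List.mem_filter.mp hkwmem
          exact ⟨kw, hmem.1, 0, by
            simpa [List.isPrefixOf_iff_prefix] using hpre⟩
        · obtain ⟨kw, hkw, j, hpre⟩ := ih.mp hw
          exact ⟨kw, hkw, j + 1, by simpa using hpre⟩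
      · rintro ⟨kw, hkw, j, hpre⟩
        cases j with
        | zero =>
            have hne : kw ≠ [] := fun he => h (he ▸ hkw)
            obtain ⟨c0, t0, rfl⟩ := List.exists_cons_of_ne_nil hne
            simp only [List.drop_zero] at hpre
            have hc0 : c0 = c := by
              obtain ⟨tail, htail⟩ := hpre
              exact (List.cons_eq_cons.mp (by simpa using htail)).1
            rw [if_pos]
            exact List.any_eq_true.mpr ⟨c0 :: t0,
              List.mem_filter.mpr ⟨hkw, by simp [hc0]⟩,
              by simpa [List.isPrefixOf_iff_prefix] using hpre⟩
        | succ j' =>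
            have : kw <+: rest.drop j' := by simpa using hpre
            split
            · rfl
            · exact ih.mpr ⟨kw, hkw, j', this⟩

theorem bwalk_eq_any (lows : List (List Char)) (h : [] ∉ lows) (tl : List Char) :
    bwalk (buildBuckets lows) tl
      = lows.any (fun kw => PySem.Chars.isIn kw tl) := by
  rw [Bool.eq_iff_iff, bwalk_iff lows h tl, List.any_eq_true]
  constructor
  · rintro ⟨kw, hkw, j, hpre⟩
    exact ⟨kw, hkw, (PySem.Chars.exists_prefix_drop_iff_isIn kw tl).mp ⟨j, hpre⟩⟩
  · rintro ⟨kw, hkw, hin⟩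
    obtain ⟨j, hpre⟩ := (PySem.Chars.exists_prefix_drop_iff_isIn kw tl).mpr hin
    exact ⟨kw, hkw, j, hpre⟩

theorem scan_pass_spec : Claim_equal_scan_pass := by
  intro paragraphs keywords shuffle_order _
  show scan_pass paragraphs keywords shuffle_order
      = scan_pass_alt paragraphs keywords shuffle_order
  simp only [scan_pass, scan_pass_alt]
  by_cases hempty : (keywords.map (fun kw => (PySem.Str.lower kw).toList)).contains []
  · rw [if_pos hempty]
    have hmem : [] ∈ keywords.map (fun kw => (PySem.Str.lower kw).toList) := by
      simpa using hempty
    obtain ⟨kw0, hkw0mem, hkw0⟩ := List.mem_map.mp hmem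
    have hstep : (fun (matched : PySem.Set Int) (p : Int × String) =>
        scanInnerA (if shuffle_order then keywords.reverse else keywords)
          (PySem.Str.lower p.2) p.1 matched)
        = fun (s : PySem.Set Int) (p : Int × String) => PySem.Set.add s p.1 := by
      funext m p
      rw [scanInnerA_eq_any, if_pos]
      refine List.any_eq_true.mpr ⟨kw0, ?_, ?_⟩
      · cases shuffle_order <;> simpa using hkw0mem
      · simp [hkw0]
    rw [hstep]
  · rw [if_neg hempty]
    have hne : [] ∉ keywords.map (fun kw => (PySem.Str.lower kw).toList) := by
      simpa using hempty
    have hstep : (fun (matched : PySem.Set Int) (p : Int × String) =>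
        scanInnerA (if shuffle_order then keywords.reverse else keywords)
          (PySem.Str.lower p.2) p.1 matched)
        = fun (s : PySem.Set Int) (p : Int × String) =>
          if bwalk (buildBuckets (keywords.map (fun kw => (PySem.Str.lower kw).toList)))
              (PySem.Str.lower p.2).toList then PySem.Set.add s p.1 else s := by
      funext m p
      rw [scanInnerA_eq_any, bwalk_eq_any _ hne]
      congr 1
      cases shuffle_order <;>
        simp [List.any_map, List.any_reverse, Function.comp_def]
    rw [hstep]
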